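-- pv_equiv track=rewrite | github.com/davidbrownell/v4-Common_MarkdownModifier | src/MarkdownModifier/src/MarkdownModifier/Plugin.py | CreateAnchorName
-- ===== SOURCE A (Python) =====
-- def CreateAnchorName(
--     text: str,
-- ) -> str:
--     """Creates a valid anchor name given the provided text."""
--
--     text = text.lower()
--
--     for source, dest in [
--         (" ", "-"),
--         (".", ""),
--     ]:
--         text = text.replace(source, dest)
--
--     return text
-- ===== SOURCE B (Python) =====
-- _CHAR_MAP = {" ": "-", ".": ""}
--
--
-- def CreateAnchorName(
--     text: str,
-- ) -> str:
--     """Creates a valid anchor name given the provided text."""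
--
--     return "".join(_CHAR_MAP.get(c, c) for c in text.lower())
-- ===== Notes on version B (the rewrite author's own statement) =====
-- stated objective: idiomatic
-- what changed: Replaces the two sequential full-string str.replace passes with a single per-character pass that joins each lowercased character's image under a small translation dict.
import Mathlib
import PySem

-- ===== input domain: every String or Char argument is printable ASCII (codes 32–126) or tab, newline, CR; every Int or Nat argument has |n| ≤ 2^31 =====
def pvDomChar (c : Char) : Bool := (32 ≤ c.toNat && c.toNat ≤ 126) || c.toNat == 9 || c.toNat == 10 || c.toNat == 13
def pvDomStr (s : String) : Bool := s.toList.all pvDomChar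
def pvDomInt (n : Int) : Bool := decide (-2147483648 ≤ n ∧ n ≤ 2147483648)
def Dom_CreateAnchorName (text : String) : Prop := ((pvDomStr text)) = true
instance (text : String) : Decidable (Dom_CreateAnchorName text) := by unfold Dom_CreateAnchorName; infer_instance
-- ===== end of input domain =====

-- B: one per-character pass over text.lower() joining dict-mapped characters, instead of A's two full-string replace passes (idiomatic; same result).
-- ===== PORT A =====
def CreateAnchorName (text : String) : String :=
  [(" ", "-"), (".", "")].foldl
    (fun t (p : String × String) => PySem.Str.replace t p.1 p.2)
    (PySem.Str.lower text)

-- ===== PORT B =====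
def pvCharMap : PySem.Dict Char String := PySem.Dict.ofList [(' ', "-"), ('.', "")]

def CreateAnchorName_alt (text : String) : String :=
  PySem.Str.join ""
    ((PySem.Str.lower text).toList.map (fun c => pvCharMap.getD c (String.ofList [c])))

-- ===== PRECONDITION & SPEC =====
def Spec_CreateAnchorName (text : String) (out : String) : Prop := out = CreateAnchorName_alt text
instance (text : String) (out : String) : Decidable (Spec_CreateAnchorName text out) := by unfold Spec_CreateAnchorName; infer_instance

-- ===== CLAIM (what is proved, stated in full; the proofs are below) =====
def Claim_equal_CreateAnchorName : Prop := ∀ (text : String), Dom_CreateAnchorName text → Spec_CreateAnchorName text (CreateAnchorName text)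

-- ===== LEMMAS AND PROOFS =====

-- ===== VERDICT (by name: the statement is the Claim_ definition above) =====
-- replace with a single-character pattern acts character-wise
theorem replace_go_single (a : Char) (new : List Char) :
    ∀ (fuel : Nat) (l acc : List Char), l.length ≤ fuel →
      PySem.Chars.replace.go [a] new fuel l acc =
        acc.reverse ++ l.flatMap (fun c => if c = a then new else [c]) := by
  intro fuel
  induction fuel with
  | zero =>
    intro l acc h
    have : l = [] := List.eq_nil_of_length_eq_zero (Nat.le_zero.mp h)
    subst this
    simp [PySem.Chars.replace.go]
  | succ n ih =>
    intro l acc h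
    cases l with
    | nil => simp [PySem.Chars.replace.go]
    | cons c t =>
      by_cases hc : c = a
      · subst hc
        have hpre : List.isPrefixOf [c] (c :: t) = true := by
          simp [List.isPrefixOf]
        rw [PySem.Chars.replace.go]
        simp only [hpre, if_true, List.length_cons, List.length_nil, List.drop_succ_cons, List.drop_zero]
        rw [ih t (new.reverse ++ acc) (by simpa using Nat.le_of_succ_le_succ h)]
        simp
      · have hpre : List.isPrefixOf [a] (c :: t) = false := by
          simp [List.isPrefixOf]
          exact fun h' => (hc h'.symm).elim
        rw [PySem.Chars.replace.go]
        simp only [hpre]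
        rw [ih t (c :: acc) (by simpa using Nat.le_of_succ_le_succ h)]
        simp [hc]

theorem replace_single (a : Char) (new l : List Char) :
    PySem.Chars.replace l [a] new = l.flatMap (fun c => if c = a then new else [c]) := by
  rw [PySem.Chars.replace]
  simp only [List.isEmpty_cons]
  simpa using replace_go_single a new l.length l [] (le_refl _)

-- sep = "" joins by concatenation
theorem intercalate_nil_eq_flatten (l : List (List Char)) :
    List.intercalate [] l = l.flatten := by
  induction l with
  | nil => simp [List.intercalate]
  | cons x xs ih =>
    cases xs with
    | nil => simp [List.intercalate]
    | cons y ys =>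
      simp only [List.intercalate, List.intersperse] at ih ⊢
      simp_all

theorem CreateAnchorName_spec : Claim_equal_CreateAnchorName := by
  intro text _
  unfold Spec_CreateAnchorName CreateAnchorName CreateAnchorName_alt
  simp only [List.foldl]
  rw [PySem.Str.replace, PySem.Str.replace, PySem.Str.join]
  apply congrArg String.ofList
  simp only [String.toList_ofList,
    show (" " : String).toList = [' '] from rfl, show ("." : String).toList = ['.'] from rfl,
    show ("-" : String).toList = ['-'] from rfl, show ("" : String).toList = [] from rfl]
  rw [replace_single, replace_single, PySem.Chars.join]
  rw [List.flatMap_assoc, intercalate_nil_eq_flatten, List.map_map, ← List.flatMap_def]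
  have hfun : (fun (a : Char) =>
        List.flatMap (fun c => if c = '.' then ([] : List Char) else [c])
          (if a = ' ' then ['-'] else [a])) =
      (fun c => (pvCharMap.getD c (String.ofList [c])).toList) := by
    funext c
    by_cases h1 : c = ' '
    · subst h1; decide
    · by_cases h2 : c = '.'
      · subst h2; decide
      · simp [h1, h2, pvCharMap, PySem.Dict.getD, PySem.Dict.get?, PySem.Dict.ofList,
          PySem.Dict.update, PySem.Dict.insert, PySem.Dict.empty, PySem.Dict.contains,
          List.find?, show (' ' == c) = false from by simpa using Ne.symm h1,
          show ('.' == c) = false from by simpa using Ne.symm h2]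
  rw [hfun]
  simp only [Function.comp_def]
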